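-- pv_equiv track=rewrite | github.com/HugoSoaresFontes/bibliographic-reviewer | atena/apps/main/utils.py | inclusive_range
-- ===== SOURCE A (Python) =====
-- def inclusive_range(start, end, step=1):
--     """Gerador que retorna tuplas que servirao para delimitar os retstart (offset de inicio do retorno da API)
--     e o retmax (quantos artigos virao em cada requisicao).
--     Serve para poder pegar todos os artigos em chunks, e é necessario pois
--     não é possivel pegar varios artigos de uma vez por causa do erro HTTP 413 (request URI too large)
--
--     Exemplo:
--     inclusive_range(1,6,2)
--     retorna:
--     [(1,2),
--      (3,2),
--      (5,1)]
--      Em cada tupla, o primeiro item é o offset de inicio e o segundo é o limite de retornos"""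
--
--     while start < end:
--         tupla = None
--         if start + step < end:
--             tupla = (start, step)
--             start = start + step
--         else:
--             tupla = (start, end - start)
--             start = end
--
--         yield tupla
-- ===== SOURCE B (Python) =====
-- def inclusive_range(start, end, step=1):
--     total = end - start
--     if total > 0:
--         q, r = divmod(total, step)
--         yield from ((start + k * step, step) for k in range(q))
--         if r:
--             yield (start + q * step, r)
-- ===== Notes on version B (the rewrite author's own statement) =====
-- stated objective: alternative
-- what changed: Replaces A's while-loop that mutates start and branches on the last chunk by a closed-form divmod: the number of full chunks q and the remainder r are computed arithmetically, the q full chunks are stamped out by a comprehension over range(q) and the short tail chunk is appended only if r is nonzero.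
import Mathlib
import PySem

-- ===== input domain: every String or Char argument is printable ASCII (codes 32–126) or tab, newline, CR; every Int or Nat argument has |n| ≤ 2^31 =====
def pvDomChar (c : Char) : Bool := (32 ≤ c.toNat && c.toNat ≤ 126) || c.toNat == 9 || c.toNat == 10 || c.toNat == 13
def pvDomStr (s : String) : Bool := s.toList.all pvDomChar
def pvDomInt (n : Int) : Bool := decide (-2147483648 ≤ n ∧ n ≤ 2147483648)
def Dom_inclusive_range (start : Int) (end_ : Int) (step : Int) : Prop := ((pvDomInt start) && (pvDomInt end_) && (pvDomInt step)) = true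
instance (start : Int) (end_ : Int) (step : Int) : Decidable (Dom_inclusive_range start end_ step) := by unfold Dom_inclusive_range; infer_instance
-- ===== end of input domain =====

-- B replaces A's mutating while-loop by a closed-form divmod: q full chunks stamped out by a
-- comprehension plus an optional remainder chunk (alternative decomposition; same cost).

-- ===== PORT A =====
-- A's while-loop; the fuel (end_ - start).toNat bounds the iterations (each step adds ≥ 1
-- under Pre_) and only makes the recursion total — it never changes a value the loop computes.
def inclusive_range_loop (end_ step : Int) : Nat → Int → List (Int × Int)
  | 0, _ => []
  | fuel + 1, start =>
    if start < end_ then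
      if start + step < end_ then
        (start, step) :: inclusive_range_loop end_ step fuel (start + step)
      else
        [(start, end_ - start)]
    else []

def inclusive_range (start : Int) (end_ : Int) (step : Int) : List (Int × Int) :=
  inclusive_range_loop end_ step (end_ - start).toNat start

-- ===== PORT B =====
def inclusive_range_alt (start : Int) (end_ : Int) (step : Int) : List (Int × Int) :=
  let total := end_ - start
  if 0 < total then
    let q := PySem.Int.floordiv total step
    let r := PySem.Int.mod total step
    ((PySem.List.pyRange 0 q 1).map (fun k => (start + k * step, step))) ++
      (if r ≠ 0 then [(start + q * step, r)] else [])
  else []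

-- ===== PRECONDITION & SPEC =====
-- Pre_ excludes exactly the inputs where A diverges: step ≤ 0 with start < end (A's while-loop
-- never terminates there); everywhere A returns (step ≥ 1, or end ≤ start) is admitted.
def Pre_inclusive_range (start : Int) (end_ : Int) (step : Int) : Prop := 1 ≤ step ∨ end_ ≤ start
instance (start : Int) (end_ : Int) (step : Int) : Decidable (Pre_inclusive_range start end_ step) := by unfold Pre_inclusive_range; infer_instance

def pvWitness_inclusive_range : Int × Int × Int := (1, 6, 2)

def Spec_inclusive_range (start : Int) (end_ : Int) (step : Int) (out : List (Int × Int)) : Prop := out = inclusive_range_alt start end_ step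
instance (start : Int) (end_ : Int) (step : Int) (out : List (Int × Int)) : Decidable (Spec_inclusive_range start end_ step out) := by unfold Spec_inclusive_range; infer_instance

-- ===== CLAIM (what is proved, stated in full; the proofs are below) =====
def Claim_equal_inclusive_range : Prop := ∀ (start : Int) (end_ : Int) (step : Int), Dom_inclusive_range start end_ step → Pre_inclusive_range start end_ step → Spec_inclusive_range start end_ step (inclusive_range start end_ step)

-- ===== LEMMAS AND PROOFS =====

lemma alt_nil (start end_ step : Int) (h : end_ ≤ start) :
    inclusive_range_alt start end_ step = [] := by
  simp only [inclusive_range_alt]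
  rw [if_neg (by omega : ¬ 0 < end_ - start)]

-- peel one full chunk off B's closed form
lemma alt_cons (start end_ step : Int) (hs : 1 ≤ step) (h : start + step < end_) :
    inclusive_range_alt start end_ step
      = (start, step) :: inclusive_range_alt (start + step) end_ step := by
  simp only [inclusive_range_alt]
  rw [if_pos (by omega : 0 < end_ - start), if_pos (by omega : 0 < end_ - (start + step))]
  have hsp : 0 < step := by omega
  rw [PySem.Int.floordiv_eq_ediv_of_pos hsp, PySem.Int.mod_eq_emod_of_pos hsp,
      PySem.Int.floordiv_eq_ediv_of_pos hsp, PySem.Int.mod_eq_emod_of_pos hsp]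
  have hne : step ≠ 0 := by omega
  have hq : (end_ - start) / step = (end_ - (start + step)) / step + 1 := by
    have hrw : end_ - start = (end_ - (start + step)) + 1 * step := by ring
    rw [hrw, Int.add_mul_ediv_right _ _ hne]
  have hr : (end_ - start) % step = (end_ - (start + step)) % step := by
    have hrw : end_ - start = (end_ - (start + step)) + step * 1 := by ring
    rw [hrw, Int.add_mul_emod_self_left]
  set q' : Int := (end_ - (start + step)) / step with hq'
  have hq'0 : 0 ≤ q' := Int.ediv_nonneg (by omega) (by omega)
  rw [hq, hr]
  have htn : (q' + 1).toNat = q'.toNat + 1 := by omega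
  rw [PySem.List.pyRange_one, PySem.List.pyRange_one]
  simp only [sub_zero, htn, List.range_succ_eq_map, List.map_cons, List.map_map,
    List.cons_append]
  congr 1
  · norm_num
  · congr 1
    · apply List.map_congr_left
      intro k _
      simp only [Function.comp, Prod.mk.injEq]
      exact ⟨by push_cast; ring, trivial⟩
    · by_cases hz : (end_ - (start + step)) % step = 0
      · simp [hz]
      · rw [if_pos hz, if_pos hz]
        refine congrArg (fun x => [x]) ?_
        simp only [Prod.mk.injEq]
        exact ⟨by ring, trivial⟩

-- B's closed form on the last (possibly short) chunk
lemma alt_last (start end_ step : Int) (hs : 1 ≤ step) (h1 : start < end_) (h2 : ¬ start + step < end_) :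
    inclusive_range_alt start end_ step = [(start, end_ - start)] := by
  simp only [inclusive_range_alt]
  rw [if_pos (by omega : 0 < end_ - start)]
  have hsp : 0 < step := by omega
  rw [PySem.Int.floordiv_eq_ediv_of_pos hsp, PySem.Int.mod_eq_emod_of_pos hsp]
  by_cases heq : end_ - start = step
  · have hq : (end_ - start) / step = 1 := by rw [heq]; exact Int.ediv_self (by omega)
    have hr : (end_ - start) % step = 0 := by rw [heq]; simp
    rw [hq, hr, (by decide : PySem.List.pyRange 0 1 1 = [0]),
        if_neg (by simp : ¬ (0:Int) ≠ 0)]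
    simp only [List.map_cons, List.map_nil, List.append_nil, Prod.mk.injEq,
      List.cons.injEq, and_true]
    exact ⟨by ring, by omega⟩
  · have hq : (end_ - start) / step = 0 := Int.ediv_eq_zero_of_lt (by omega) (by omega)
    have hr : (end_ - start) % step = end_ - start := Int.emod_eq_of_lt (by omega) (by omega)
    rw [hq, hr, (by decide : PySem.List.pyRange 0 0 1 = []),
        if_pos (by omega : end_ - start ≠ 0)]
    simp only [List.map_nil, List.nil_append, List.cons.injEq, Prod.mk.injEq, and_true]
    ring

lemma loop_eq_alt (end_ step : Int) (hs : 1 ≤ step) :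
    ∀ (fuel : Nat) (start : Int), (end_ - start).toNat ≤ fuel →
      inclusive_range_loop end_ step fuel start = inclusive_range_alt start end_ step := by
  intro fuel
  induction fuel with
  | zero =>
    intro start h
    rw [alt_nil _ _ _ (by omega)]
    simp [inclusive_range_loop]
  | succ n ih =>
    intro start h
    by_cases hlt : start < end_
    · by_cases h2 : start + step < end_
      · simp only [inclusive_range_loop, if_pos hlt, if_pos h2]
        rw [ih (start + step) (by omega), alt_cons start end_ step hs h2]
      · simp only [inclusive_range_loop, if_pos hlt, if_neg h2]
        rw [alt_last start end_ step hs hlt h2]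
    · rw [alt_nil _ _ _ (by omega)]
      simp [inclusive_range_loop, hlt]

-- ===== VERDICT (by name: the statement is the Claim_ definition above) =====
theorem inclusive_range_spec : Claim_equal_inclusive_range := by
  intro start end_ step _ hpre
  unfold Spec_inclusive_range inclusive_range
  rcases hpre with hs | hle
  · exact loop_eq_alt end_ step hs (end_ - start).toNat start le_rfl
  · rw [alt_nil _ _ _ hle]
    have : (end_ - start).toNat = 0 := by omega
    rw [this]
    rfl
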